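-- pv_equiv track=rewrite | github.com/jeronimocabezuelo/KnotIA2 | KnotDatabase.py | numberToCodeKnot
-- ===== SOURCE A (Python) =====
-- dict_knot_numbers = {
--     0: 1,
--     3: 1,
--     4: 1,
--     5: 2,
--     6: 3,
--     7: 7,
--     8: 21,
--     9: 49,
--     10: 165,
-- }
--
-- def numberToCodeKnot(n: int) -> str:
--     n += 1
--     keys = list(dict_knot_numbers.keys())
--     for key in keys:
--         if n <= dict_knot_numbers[key]:
--             return "{}_{}".format(key, n)
--         n -= dict_knot_numbers[key]
--     return ""
-- ===== SOURCE B (Python) =====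
-- dict_knot_numbers = {
--     0: 1,
--     3: 1,
--     4: 1,
--     5: 2,
--     6: 3,
--     7: 7,
--     8: 21,
--     9: 49,
--     10: 165,
-- }
--
-- _KEYS = list(dict_knot_numbers.keys())
-- _PREFIX = []
-- _acc = 0
-- for _c in dict_knot_numbers.values():
--     _acc += _c
--     _PREFIX.append(_acc)
--
--
-- def numberToCodeKnot(n: int) -> str:
--     v = n + 1
--     # binary search: first index with _PREFIX[i] >= v
--     lo, hi = 0, len(_PREFIX)
--     while lo < hi:
--         mid = (lo + hi) // 2
--         if _PREFIX[mid] < v: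
--             lo = mid + 1
--         else:
--             hi = mid
--     if lo == len(_PREFIX):
--         return ""
--     prev = _PREFIX[lo - 1] if lo > 0 else 0
--     return "{}_{}".format(_KEYS[lo], v - prev)
-- ===== Notes on version B (the rewrite author's own statement) =====
-- stated objective: alternative
-- what changed: Replaces the sequential subtract-and-test loop over the dict with a precomputed prefix-sum table of the counts plus a hand-written binary search for the bucket, then one subtraction for the residual.
import Mathlib
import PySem

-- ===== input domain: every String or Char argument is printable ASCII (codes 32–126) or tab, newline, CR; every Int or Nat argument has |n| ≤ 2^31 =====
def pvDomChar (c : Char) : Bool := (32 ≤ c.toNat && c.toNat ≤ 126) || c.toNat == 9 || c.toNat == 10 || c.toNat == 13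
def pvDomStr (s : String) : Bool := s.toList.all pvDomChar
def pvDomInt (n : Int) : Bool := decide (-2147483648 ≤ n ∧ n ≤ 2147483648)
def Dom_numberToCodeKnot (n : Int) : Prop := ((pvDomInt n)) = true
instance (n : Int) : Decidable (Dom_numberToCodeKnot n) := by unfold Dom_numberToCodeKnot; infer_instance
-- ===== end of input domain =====

-- B replaces A's sequential subtract-and-test loop by a precomputed prefix-sum table
-- and a hand-written binary search (alternative decomposition, same exact values).

-- ===== PORT A =====
def pvDictKnot : PySem.Dict Int Int :=
  PySem.Dict.mk [(0,1),(3,1),(4,1),(5,2),(6,3),(7,7),(8,21),(9,49),(10,165)]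

def numberToCodeKnotLoop (n : Int) (keys : List Int) : String :=
  match keys with
  | [] => ""
  | key :: rest =>
    let c := (PySem.Dict.get? pvDictKnot key).getD 0
    if n ≤ c then PySem.Int.toStr key ++ "_" ++ PySem.Int.toStr n
    else numberToCodeKnotLoop (n - c) rest

def numberToCodeKnot (n : Int) : String :=
  numberToCodeKnotLoop (n + 1) (PySem.Dict.keys pvDictKnot)

-- ===== PORT B =====
def pvKeysB : List Int := [0,3,4,5,6,7,8,9,10]
def pvPrefixB : List Int := [1,2,3,5,8,15,36,85,250]

-- hand-written binary search from Source B: first index lo ≤ i < hi with prefix[i] ≥ v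
def bsearchLoop (v : Int) (lo hi : Nat) : Nat :=
  if _h : lo < hi then
    let mid := (lo + hi) / 2
    if pvPrefixB.getD mid 0 < v then bsearchLoop v (mid + 1) hi else bsearchLoop v lo mid
  else lo
termination_by hi - lo
decreasing_by all_goals omega

def numberToCodeKnot_alt (n : Int) : String :=
  let v := n + 1
  let lo := bsearchLoop v 0 pvPrefixB.length
  if lo = pvPrefixB.length then ""
  else
    let prev := if 0 < lo then pvPrefixB.getD (lo - 1) 0 else 0
    PySem.Int.toStr (pvKeysB.getD lo 0) ++ "_" ++ PySem.Int.toStr (v - prev)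

-- ===== PRECONDITION & SPEC =====
def Spec_numberToCodeKnot (n : Int) (out : String) : Prop := out = numberToCodeKnot_alt n
instance (n : Int) (out : String) : Decidable (Spec_numberToCodeKnot n out) := by unfold Spec_numberToCodeKnot; infer_instance

-- ===== CLAIM (what is proved, stated in full; the proofs are below) =====
def Claim_equal_numberToCodeKnot : Prop := ∀ (n : Int), Dom_numberToCodeKnot n → Spec_numberToCodeKnot n (numberToCodeKnot n)

-- ===== LEMMAS AND PROOFS =====

-- ===== VERDICT (by name: the statement is the Claim_ definition above) =====
theorem numberToCodeKnot_spec : Claim_equal_numberToCodeKnot := by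
  intro n _
  unfold Spec_numberToCodeKnot numberToCodeKnot numberToCodeKnot_alt
  set v := n + 1 with hv
  by_cases h0 : v ≤ 1
  · (simp [numberToCodeKnotLoop, pvDictKnot, PySem.Dict.keys, PySem.Dict.get?_mk_cons, bsearchLoop, pvPrefixB, pvKeysB, show v ≤ 1 from by omega, show ¬((8:Int) < v) from by omega, show ¬((3:Int) < v) from by omega, show ¬((2:Int) < v) from by omega, show ¬((1:Int) < v) from by omega]; try (congr 1; omega))
  by_cases h1 : v ≤ 2
  · (simp [numberToCodeKnotLoop, pvDictKnot, PySem.Dict.keys, PySem.Dict.get?_mk_cons, bsearchLoop, pvPrefixB, pvKeysB, show ¬(v ≤ 1) from by omega, show v - 1 ≤ 1 from by omega, show ¬((8:Int) < v) from by omega, show ¬((3:Int) < v) from by omega, show ¬((2:Int) < v) from by omega, show (1:Int) < v from by omega]; try (congr 1; omega))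
  by_cases h2 : v ≤ 3
  · (simp [numberToCodeKnotLoop, pvDictKnot, PySem.Dict.keys, PySem.Dict.get?_mk_cons, bsearchLoop, pvPrefixB, pvKeysB, show ¬(v ≤ 1) from by omega, show ¬(v - 1 ≤ 1) from by omega, show v - 1 - 1 ≤ 1 from by omega, show ¬((8:Int) < v) from by omega, show ¬((3:Int) < v) from by omega, show (2:Int) < v from by omega]; try (congr 1; omega))
  by_cases h3 : v ≤ 5
  · (simp [numberToCodeKnotLoop, pvDictKnot, PySem.Dict.keys, PySem.Dict.get?_mk_cons, bsearchLoop, pvPrefixB, pvKeysB, show ¬(v ≤ 1) from by omega, show ¬(v - 1 ≤ 1) from by omega, show ¬(v - 1 - 1 ≤ 1) from by omega, show v - 1 - 1 - 1 ≤ 2 from by omega, show ¬((8:Int) < v) from by omega, show (3:Int) < v from by omega, show ¬((5:Int) < v) from by omega]; try (congr 1; omega))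
  by_cases h4 : v ≤ 8
  · (simp [numberToCodeKnotLoop, pvDictKnot, PySem.Dict.keys, PySem.Dict.get?_mk_cons, bsearchLoop, pvPrefixB, pvKeysB, show ¬(v ≤ 1) from by omega, show ¬(v - 1 ≤ 1) from by omega, show ¬(v - 1 - 1 ≤ 1) from by omega, show ¬(v - 1 - 1 - 1 ≤ 2) from by omega, show v - 1 - 1 - 1 - 2 ≤ 3 from by omega, show ¬((8:Int) < v) from by omega, show (3:Int) < v from by omega, show (5:Int) < v from by omega]; try (congr 1; omega))
  by_cases h5 : v ≤ 15
  · (simp [numberToCodeKnotLoop, pvDictKnot, PySem.Dict.keys, PySem.Dict.get?_mk_cons, bsearchLoop, pvPrefixB, pvKeysB, show ¬(v ≤ 1) from by omega, show ¬(v - 1 ≤ 1) from by omega, show ¬(v - 1 - 1 ≤ 1) from by omega, show ¬(v - 1 - 1 - 1 ≤ 2) from by omega, show ¬(v - 1 - 1 - 1 - 2 ≤ 3) from by omega, show v - 1 - 1 - 1 - 2 - 3 ≤ 7 from by omega, show (8:Int) < v from by omega, show ¬((85:Int) < v) from by omega, show ¬((36:Int) < v) from by omega, show ¬((15:Int) <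 v) from by omega]; try (congr 1; omega))
  by_cases h6 : v ≤ 36
  · (simp [numberToCodeKnotLoop, pvDictKnot, PySem.Dict.keys, PySem.Dict.get?_mk_cons, bsearchLoop, pvPrefixB, pvKeysB, show ¬(v ≤ 1) from by omega, show ¬(v - 1 ≤ 1) from by omega, show ¬(v - 1 - 1 ≤ 1) from by omega, show ¬(v - 1 - 1 - 1 ≤ 2) from by omega, show ¬(v - 1 - 1 - 1 - 2 ≤ 3) from by omega, show ¬(v - 1 - 1 - 1 - 2 - 3 ≤ 7) from by omega, show v - 1 - 1 - 1 - 2 - 3 - 7 ≤ 21 from by omega, show (8:Int) < v from by omega, show ¬((85:Int) < v) from by omega, show ¬((36:Int) < v) from by omega, show (15:Int) < v from by omega]; try (congr 1; omega))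
  by_cases h7 : v ≤ 85
  · (simp [numberToCodeKnotLoop, pvDictKnot, PySem.Dict.keys, PySem.Dict.get?_mk_cons, bsearchLoop, pvPrefixB, pvKeysB, show ¬(v ≤ 1) from by omega, show ¬(v - 1 ≤ 1) from by omega, show ¬(v - 1 - 1 ≤ 1) from by omega, show ¬(v - 1 - 1 - 1 ≤ 2) from by omega, show ¬(v - 1 - 1 - 1 - 2 ≤ 3) from by omega, show ¬(v - 1 - 1 - 1 - 2 - 3 ≤ 7) from by omega, show ¬(v - 1 - 1 - 1 - 2 - 3 - 7 ≤ 21) from by omega, show v - 1 - 1 - 1 - 2 - 3 - 7 - 21 ≤ 49 from by omega, show (8:Int) < v from by omega, show ¬((85:Int) < v) from by omega, show (36:Int) < v from by omega]; try (congr 1; omega))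
  by_cases h8 : v ≤ 250
  · (simp [numberToCodeKnotLoop, pvDictKnot, PySem.Dict.keys, PySem.Dict.get?_mk_cons, bsearchLoop, pvPrefixB, pvKeysB, show ¬(v ≤ 1) from by omega, show ¬(v - 1 ≤ 1) from by omega, show ¬(v - 1 - 1 ≤ 1) from by omega, show ¬(v - 1 - 1 - 1 ≤ 2) from by omega, show ¬(v - 1 - 1 - 1 - 2 ≤ 3) from by omega, show ¬(v - 1 - 1 - 1 - 2 - 3 ≤ 7) from by omega, show ¬(v - 1 - 1 - 1 - 2 - 3 - 7 ≤ 21) from by omega, show ¬(v - 1 - 1 - 1 - 2 - 3 - 7 - 21 ≤ 49) from by omega, show v - 1 - 1 - 1 - 2 - 3 - 7 - 21 - 49 ≤ 165 from by omega, show (8:Int) < v from by omega, show (85:Int) < v from by omega, show ¬((250:Int) < v) from by omega]; try (congr 1; omega))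
  · (simp [numberToCodeKnotLoop, pvDictKnot, PySem.Dict.keys, PySem.Dict.get?_mk_cons, bsearchLoop, pvPrefixB, pvKeysB, show ¬(v ≤ 1) from by omega, show ¬(v - 1 ≤ 1) from by omega, show ¬(v - 1 - 1 ≤ 1) from by omega, show ¬(v - 1 - 1 - 1 ≤ 2) from by omega, show ¬(v - 1 - 1 - 1 - 2 ≤ 3) from by omega, show ¬(v - 1 - 1 - 1 - 2 - 3 ≤ 7) from by omega, show ¬(v - 1 - 1 - 1 - 2 - 3 - 7 ≤ 21) from by omega, show ¬(v - 1 - 1 - 1 - 2 - 3 - 7 - 21 ≤ 49) from by omega, show ¬(v - 1 - 1 - 1 - 2 - 3 - 7 - 21 - 49 ≤ 165) from by omega, show (8:Int) < v from by omega, show (85:Int) < v from by omega, show (250:Int) < v from by omega]; try (congr 1; omega))
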